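-- pv_equiv track=rewrite | github.com/neochen1991/multi-agent-cli | backend/app/runtime/langgraph/phase_executor.py | _analysis_batches
-- ===== SOURCE A (Python) =====
-- from typing import Any, Dict, List, Optional
--
-- def _analysis_batches(target_names: List[str], priority_batches: List[List[str]], batch_limit: int) -> List[List[str]]:
--     """
--     按优先级和批次上限切分 Agent 列表。
--
--     关键点：
--     - priority_batches 决定谁先跑
--     - batch_limit 决定单批次最多并发多少 Agent
--     - remaining 会接住未命中优先组的 Agent，保证没人被漏掉
--     """
--     remaining = list(target_names)
--     batches: List[List[str]] = []
--     limit = max(1, int(batch_limit or 1))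
--     for group in priority_batches:
--         selected = [name for name in remaining if name in set(group)]
--         if selected:
--             for index in range(0, len(selected), limit):
--                 batches.append(selected[index:index + limit])
--             remaining = [name for name in remaining if name not in set(selected)]
--     if remaining:
--         for index in range(0, len(remaining), limit):
--             batches.append(remaining[index:index + limit])
--     return batches
-- ===== SOURCE B (Python) =====
-- from typing import List
--
-- def _analysis_batches(target_names: List[str], priority_batches: List[List[str]], batch_limit: int) -> List[List[str]]:
--     limit = max(1, int(batch_limit or 1))
--     # first priority group containing each name wins
--     prio = {}
--     for i, group in enumerate(priority_batches):
--         for name in group: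
--             prio.setdefault(name, i)
--     k = len(priority_batches)
--     buckets = [[] for _ in range(k + 1)]
--     for name in target_names:
--         buckets[prio.get(name, k)].append(name)
--     result = []
--     for bucket in buckets:
--         for index in range(0, len(bucket), limit):
--             result.append(bucket[index:index + limit])
--     return result
-- ===== Notes on version B (the rewrite author's own statement) =====
-- stated objective: faster
-- what changed: Replaces the per-group filter-and-rebuild-remaining passes with one dict mapping each name to its first-matching group index, a single stable bucketing pass over target_names, and one chunking sweep over the buckets.
import Mathlib
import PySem

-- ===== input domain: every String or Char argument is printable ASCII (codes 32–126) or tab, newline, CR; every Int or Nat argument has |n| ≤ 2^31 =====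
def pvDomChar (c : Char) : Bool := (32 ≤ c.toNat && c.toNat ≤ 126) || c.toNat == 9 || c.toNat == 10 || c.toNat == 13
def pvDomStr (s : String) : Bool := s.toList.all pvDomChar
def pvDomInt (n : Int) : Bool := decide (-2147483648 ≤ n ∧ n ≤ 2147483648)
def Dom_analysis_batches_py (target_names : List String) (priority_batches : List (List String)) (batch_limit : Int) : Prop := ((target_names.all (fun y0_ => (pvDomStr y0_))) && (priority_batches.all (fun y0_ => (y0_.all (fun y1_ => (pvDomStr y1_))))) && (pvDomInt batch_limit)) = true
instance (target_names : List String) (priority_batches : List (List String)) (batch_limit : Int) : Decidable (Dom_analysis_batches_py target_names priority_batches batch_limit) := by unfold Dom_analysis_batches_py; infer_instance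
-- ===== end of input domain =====

-- B replaces A's per-group filter-and-rebuild passes over `remaining` by a first-match-index
-- dict, one stable bucketing pass over target_names, and one chunking sweep over the buckets.

-- `for index in range(0, len(xs), limit): out.append(xs[index:index+limit])` — the chunking
-- loop both Pythons contain verbatim (A appends into `batches`, B into `result`).
def pvChunksInto (acc : List (List String)) (xs : List String) (limit : Int) : List (List String) :=
  (PySem.List.pyRange 0 (xs.length : Int) limit).foldl
    (fun acc index => acc ++ [PySem.List.slice xs (some index) (some (index + limit))]) acc

-- ===== PORT A =====
def analysis_batches_py (target_names : List String) (priority_batches : List (List String)) (batch_limit : Int) : List (List String) :=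
  -- limit = max(1, int(batch_limit or 1)); `batch_limit or 1` is 1 exactly when batch_limit == 0
  let limit : Int := max 1 (if batch_limit = 0 then 1 else batch_limit)
  -- state = (remaining, batches); `remaining = list(target_names)`
  let st := priority_batches.foldl
    (fun (st : List String × List (List String)) group =>
      let selected := st.1.filter (fun name => (PySem.Set.ofList group).contains name)
      if selected.isEmpty then st
      else
        (st.1.filter (fun name => !((PySem.Set.ofList selected).contains name)),
         pvChunksInto st.2 selected limit))
    (target_names, [])
  if st.1.isEmpty then st.2 else pvChunksInto st.2 st.1 limit

-- ===== PORT B =====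
def analysis_batches_py_alt (target_names : List String) (priority_batches : List (List String)) (batch_limit : Int) : List (List String) :=
  let limit : Int := max 1 (if batch_limit = 0 then 1 else batch_limit)
  let prio : PySem.Dict String Int := (PySem.List.enumerate priority_batches).foldl
    (fun d ig => ig.2.foldl (fun d name => d.setdefault name ig.1) d) PySem.Dict.empty
  let k : Int := priority_batches.length
  let buckets : List (List String) := List.replicate (priority_batches.length + 1) []
  -- buckets[prio.get(name, k)].append(name); the index is always a Nat in [0, k], so .toNat is exact
  let buckets := target_names.foldl
    (fun bs name => bs.modify ((prio.getD name k).toNat) (· ++ [name])) buckets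
  buckets.foldl (fun res bucket => pvChunksInto res bucket limit) []

-- ===== PRECONDITION & SPEC =====
def Spec_analysis_batches_py (target_names : List String) (priority_batches : List (List String)) (batch_limit : Int) (out : List (List String)) : Prop := out = analysis_batches_py_alt target_names priority_batches batch_limit
instance (target_names : List String) (priority_batches : List (List String)) (batch_limit : Int) (out : List (List String)) : Decidable (Spec_analysis_batches_py target_names priority_batches batch_limit out) := by unfold Spec_analysis_batches_py; infer_instance

-- ===== CLAIM (what is proved, stated in full; the proofs are below) =====
def Claim_equal_analysis_batches_py : Prop := ∀ (target_names : List String) (priority_batches : List (List String)) (batch_limit : Int), Dom_analysis_batches_py target_names priority_batches batch_limit → Spec_analysis_batches_py target_names priority_batches batch_limit (analysis_batches_py target_names priority_batches batch_limit)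

-- ===== LEMMAS AND PROOFS =====

-- index of the first group containing n (gs.length if none)
def pvFidx (gs : List (List String)) (n : String) : Nat := gs.findIdx (fun g => g.contains n)

-- the k-th priority bucket of targets, k = 0 .. gs.length
def pvBucketsOf (targets : List String) (gs : List (List String)) : List (List String) :=
  (List.range (gs.length + 1)).map (fun j => targets.filter (fun n => pvFidx gs n == j))

theorem pvChunksInto_nil (acc : List (List String)) (limit : Int) :
    pvChunksInto acc [] limit = acc := by
  simp [pvChunksInto, PySem.List.pyRange]

theorem pvChunksInto_factor (acc : List (List String)) (xs : List String) (limit : Int) :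
    pvChunksInto acc xs limit = acc ++ pvChunksInto [] xs limit := by
  unfold pvChunksInto
  rw [PySem.List.foldl_append_eq_flatMap
        (fun index => [PySem.List.slice xs (some index) (some (index + limit))]),
      PySem.List.foldl_append_eq_flatMap
        (fun index => [PySem.List.slice xs (some index) (some (index + limit))])]
  simp

theorem pvSetContains (g : List String) (n : String) :
    (PySem.Set.ofList g).contains n = g.contains n := by
  simp [PySem.Set.contains_eq_listContains]

theorem pvFidx_cons (g : List String) (gs : List (List String)) (n : String) :
    pvFidx (g :: gs) n = if g.contains n then 0 else pvFidx gs n + 1 := by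
  simp [pvFidx, List.findIdx_cons]

-- A's `remaining = [n for n in remaining if n not in set(selected)]` removes exactly the
-- members of the group.
theorem pvRemaining_filter (rem : List String) (g : List String) :
    rem.filter (fun name => !((rem.filter (fun x => g.contains x)).contains name))
      = rem.filter (fun name => !(g.contains name)) := by
  apply List.filter_congr
  intro x hx
  by_cases hg : g.contains x = true <;> simp_all

theorem pvBuckets_cons (rem : List String) (g : List String) (gs : List (List String)) :
    pvBucketsOf rem (g :: gs)
      = (rem.filter (fun n => g.contains n))
        :: pvBucketsOf (rem.filter (fun n => !(g.contains n))) gs := by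
  unfold pvBucketsOf
  rw [List.length_cons, List.range_succ_eq_map]
  simp only [List.map_cons, List.map_map]
  refine List.cons_eq_cons.mpr ⟨?_, ?_⟩
  · apply List.filter_congr
    intro x _
    by_cases hg : x ∈ g <;> simp [pvFidx_cons, hg]
  · apply List.map_congr_left
    intro j _
    simp only [Function.comp_apply]
    rw [List.filter_filter]
    apply List.filter_congr
    intro x _
    by_cases hg : x ∈ g <;> simp [pvFidx_cons, hg, Nat.succ_eq_add_one]

theorem pvLoopA (limit : Int) (gs : List (List String)) :
    ∀ (rem : List String) (batches : List (List String)),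
    (let st := gs.foldl
        (fun (st : List String × List (List String)) group =>
          let selected := st.1.filter (fun name => (PySem.Set.ofList group).contains name)
          if selected.isEmpty then st
          else
            (st.1.filter (fun name => !((PySem.Set.ofList selected).contains name)),
             pvChunksInto st.2 selected limit))
        (rem, batches);
      if st.1.isEmpty then st.2 else pvChunksInto st.2 st.1 limit)
      = batches ++ (pvBucketsOf rem gs).flatMap (fun b => pvChunksInto [] b limit) := by
  induction gs with
  | nil =>
    intro rem batches
    dsimp only [List.foldl_nil]
    have hb : pvBucketsOf rem [] = [rem] := by
      simp [pvBucketsOf, pvFidx, List.findIdx]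
      exact fun a _ => rfl
    rw [hb]
    by_cases hrem : rem.isEmpty = true
    · rw [if_pos hrem]
      rw [List.isEmpty_iff.mp hrem]
      simp [pvChunksInto_nil]
    · rw [if_neg hrem]
      rw [pvChunksInto_factor]
      simp
  | cons g gs ih =>
    intro rem batches
    dsimp only at ih ⊢
    simp only [pvSetContains] at ih ⊢
    rw [List.foldl_cons]
    dsimp only
    rw [pvBuckets_cons, List.flatMap_cons]
    by_cases hsel : (rem.filter (fun name => g.contains name)).isEmpty = true
    · rw [if_pos hsel]
      have hnil : rem.filter (fun name => g.contains name) = [] := List.isEmpty_iff.mp hsel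
      have hall : ∀ x ∈ rem, x ∉ g := by
        intro x hx hxg
        exact (List.filter_eq_nil_iff.mp hnil x hx) (by simp [hxg])
      have hrem' : rem.filter (fun n => !(g.contains n)) = rem := by
        rw [List.filter_eq_self]
        intro x hx
        simp [hall x hx]
      rw [ih rem batches, hnil, pvChunksInto_nil, hrem']
      simp
    · rw [if_neg hsel]
      rw [pvRemaining_filter]
      rw [ih]
      rw [pvChunksInto_factor batches]
      simp [List.append_assoc]

-- ===== B-side lemmas =====

theorem pvSetdefault_eq {κ ν : Type} [BEq κ] [LawfulBEq κ] (d : PySem.Dict κ ν) (k : κ) (v : ν) :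
    d.setdefault k v = if d.contains k then d else d.insert k v := by
  unfold PySem.Dict.setdefault
  split_ifs with h
  · rfl
  · apply PySem.Dict.ext
    rw [PySem.Dict.items_insert_of_not_contains d v (by revert h; cases d.contains k <;> simp)]

theorem pvInnerFold (i : Int) (n : String) :
    ∀ (g : List String) (d : PySem.Dict String Int),
    (g.foldl (fun d name => d.setdefault name i) d).get? n
      = ((d.get? n).orElse (fun _ => if g.contains n then some i else none)) := by
  intro g
  induction g with
  | nil => intro d; cases hd : d.get? n <;> simp [hd, Option.orElse]
  | cons a g ihg =>
    intro d
    rw [List.foldl_cons, ihg, pvSetdefault_eq]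
    by_cases hc : d.contains a = true
    · rw [if_pos hc]
      by_cases hna : n = a
      · subst hna
        have hs : (d.get? n).isSome = true := by
          rw [← PySem.Dict.contains_eq_isSome_get?]; exact hc
        cases hd : d.get? n with
        | none => rw [hd] at hs; simp at hs
        | some v => simp [hd, Option.orElse]
      · cases hd : d.get? n <;> simp [hd, Option.orElse, hna]
    · rw [if_neg hc]
      by_cases hna : n = a
      · subst hna
        have hnone : d.get? n = none := by
          cases hd : d.get? n with
          | none => rfl
          | some v =>
            exfalso
            have : (d.get? n).isSome = true := by simp [hd]
            rw [← PySem.Dict.contains_eq_isSome_get?] at this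
            exact hc this
        simp [hnone, PySem.Dict.get?_insert_self, Option.orElse, List.contains_cons]
      · rw [PySem.Dict.get?_insert, if_neg hna]
        cases hd : d.get? n <;> simp [hd, Option.orElse, hna]

theorem pvPrioFold (n : String) :
    ∀ (gs : List (List String)) (s : Int) (d : PySem.Dict String Int),
    ((PySem.List.enumerate gs s).foldl
        (fun d ig => ig.2.foldl (fun d name => d.setdefault name ig.1) d) d).get? n
      = ((d.get? n).orElse (fun _ =>
          if pvFidx gs n < gs.length then some (s + (pvFidx gs n : Int)) else none)) := by
  intro gs
  induction gs with
  | nil =>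
    intro s d
    simp [PySem.List.enumerate, pvFidx, List.findIdx]
  | cons g gs ihg =>
    intro s d
    rw [PySem.List.enumerate_cons, List.foldl_cons, ihg, pvInnerFold]
    by_cases hg : n ∈ g
    · have h0 : pvFidx (g :: gs) n = 0 := by simp [pvFidx_cons, hg]
      cases hd : d.get? n <;> simp [hd, Option.orElse, hg, h0]
    · have h1 : pvFidx (g :: gs) n = pvFidx gs n + 1 := by simp [pvFidx_cons, hg]
      by_cases hlt : pvFidx gs n < gs.length
      · cases hd : d.get? n with
        | none =>
          simp only [hd, Option.orElse, h1, List.length_cons]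
          simp [hg, hlt]
          try omega
        | some v => simp [hd, Option.orElse]
      · cases hd : d.get? n with
        | none =>
          simp only [hd, Option.orElse, h1, List.length_cons]
          simp [hg, hlt]
          try omega
        | some v => simp [hd, Option.orElse]

theorem pvPrioIdx (gs : List (List String)) (n : String) :
    (((PySem.List.enumerate gs).foldl
        (fun d ig => ig.2.foldl (fun d name => d.setdefault name ig.1) d)
        PySem.Dict.empty).getD n (gs.length : Int)).toNat = pvFidx gs n := by
  rw [PySem.Dict.getD_eq_get?_getD, pvPrioFold n gs 0 PySem.Dict.empty]
  have hle : pvFidx gs n ≤ gs.length := List.findIdx_le_length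
  by_cases hlt : pvFidx gs n < gs.length
  · simp [PySem.Dict.get?_empty, Option.orElse, hlt]
  · have : pvFidx gs n = gs.length := by omega
    simp [PySem.Dict.get?_empty, Option.orElse, hlt, this]

theorem pvBucketFold (idx : String → Nat) (j : Nat) :
    ∀ (targets : List String) (bs : List (List String)),
    (targets.foldl (fun bs name => bs.modify (idx name) (· ++ [name])) bs)[j]?
      = (bs[j]?).map (· ++ targets.filter (fun n => idx n == j)) := by
  intro targets
  induction targets with
  | nil => intro bs; cases hb : bs[j]? <;> simp [hb]
  | cons t ts iht =>
    intro bs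
    rw [List.foldl_cons, iht, List.getElem?_modify]
    by_cases h : idx t = j
    · cases hb : bs[j]? <;> simp [hb, h, List.filter_cons]
    · have hne : (idx t == j) = false := by simp [h]
      cases hb : bs[j]? <;> simp [hb, h, hne, List.filter_cons]

theorem pvBuckets_eq (targets : List String) (gs : List (List String)) (idx : String → Nat)
    (h : ∀ n, idx n = pvFidx gs n) :
    targets.foldl (fun bs name => bs.modify (idx name) (· ++ [name]))
        (List.replicate (gs.length + 1) [])
      = pvBucketsOf targets gs := by
  have hfun : (fun (bs : List (List String)) name => bs.modify (idx name) (· ++ [name]))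
      = (fun bs name => bs.modify (pvFidx gs name) (· ++ [name])) := by
    funext bs name; rw [h]
  rw [hfun]
  apply List.ext_getElem?
  intro j
  rw [pvBucketFold]
  unfold pvBucketsOf
  rw [List.getElem?_map]
  by_cases hj : j < gs.length + 1
  · rw [List.getElem?_replicate, if_pos hj, List.getElem?_range hj]
    simp
  · rw [List.getElem?_replicate, if_neg hj]
    rw [List.getElem?_eq_none (by simpa using hj)]
    simp

theorem pvAltEq (targets : List String) (gs : List (List String)) (limit : Int) :
    ((targets.foldl
        (fun bs name => bs.modify
          ((((PySem.List.enumerate gs).foldl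
              (fun d ig => ig.2.foldl (fun d name => d.setdefault name ig.1) d)
              PySem.Dict.empty).getD name (gs.length : Int)).toNat) (· ++ [name]))
        (List.replicate (gs.length + 1) [])).foldl
      (fun res bucket => pvChunksInto res bucket limit) [])
      = (pvBucketsOf targets gs).flatMap (fun b => pvChunksInto [] b limit) := by
  rw [pvBuckets_eq targets gs _ (fun n => pvPrioIdx gs n)]
  have hfun : (fun (res : List (List String)) bucket => pvChunksInto res bucket limit)
      = (fun res bucket => res ++ pvChunksInto [] bucket limit) := by
    funext res bucket; rw [pvChunksInto_factor]
  rw [hfun, PySem.List.foldl_append_eq_flatMap (fun b => pvChunksInto [] b limit)]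
  simp

-- ===== VERDICT (by name: the statement is the Claim_ definition above) =====
theorem analysis_batches_py_spec : Claim_equal_analysis_batches_py := by
  intro targets gs bl _
  unfold Spec_analysis_batches_py analysis_batches_py analysis_batches_py_alt
  rw [pvLoopA, pvAltEq]
  simp
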